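-- pv_equiv track=rewrite | github.com/AjaiSenthilkumar/My_leetCode | countOfTriplets.py | countTriple
-- ===== SOURCE A (Python) =====
-- def countTriple(arr) :
--     arr.sort()
--     n = len(arr)
--     count = 0
--     for i in range(n - 1,0,-1) :
--         low = 0
--         high = n - 1
--         while low < high :
--             target = arr[i]
--             s = arr[low] + arr[high]
--             if s == target :
--                 count += 1
--                 low += 1
--                 high -= 1
--             elif s < target :
--                 low += 1
--             elif s > target :
--                 high -= 1
--     return count
-- ===== SOURCE B (Python) =====
-- def countTriple(arr):
--     arr.sort()
--     n = len(arr)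
--     if n < 2:
--         return 0
--
--     def count_pairs(target):
--         low, high, cnt = 0, n - 1, 0
--         while low < high:
--             s = arr[low] + arr[high]
--             if s == target:
--                 cnt += 1
--                 low += 1
--                 high -= 1
--             elif s < target:
--                 low += 1
--             else:
--                 high -= 1
--         return cnt
--
--     # group equal runs of arr[1:] (sorted), one two-pointer scan per distinct value
--     total = 0
--     prev = arr[1]
--     runlen = 0
--     for x in arr[1:]:
--         if x == prev:
--             runlen += 1
--         else:
--             total += runlen * count_pairs(prev)
--             prev = x
--             runlen = 1
--     total += runlen * count_pairs(prev)
--     return total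
-- ===== Notes on version B (the rewrite author's own statement) =====
-- stated objective: alternative
-- what changed: Instead of running the greedy two-pointer scan once per outer index, B groups the sorted array's tail into runs of equal values and runs the scan once per distinct value, multiplying by the run length.
import Mathlib
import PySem

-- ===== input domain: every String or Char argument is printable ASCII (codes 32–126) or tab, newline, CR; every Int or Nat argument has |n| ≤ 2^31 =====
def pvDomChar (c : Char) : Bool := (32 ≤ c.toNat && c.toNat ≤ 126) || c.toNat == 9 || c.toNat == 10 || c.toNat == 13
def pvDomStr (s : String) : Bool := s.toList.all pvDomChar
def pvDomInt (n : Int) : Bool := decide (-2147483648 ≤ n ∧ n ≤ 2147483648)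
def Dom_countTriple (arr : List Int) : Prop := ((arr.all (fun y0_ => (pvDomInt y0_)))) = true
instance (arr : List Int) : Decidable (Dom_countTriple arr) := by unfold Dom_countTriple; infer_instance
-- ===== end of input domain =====

-- B groups the sorted array's equal values into runs so the greedy two-pointer scan runs once
-- per distinct value (objective: alternative; faster only on duplicate-heavy inputs).
-- Both A and B sort the caller's list in place (same side effect); the theorems are about the return value.

-- ===== PORT A =====
-- the inner 'while low < high' loop of A, with the running count threaded through
def twoPtrLoop (s : List Int) (target low high count : Int) : Int :=
  if low < high then
    let sm := PySem.List.pyGetD s low 0 + PySem.List.pyGetD s high 0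
    if sm = target then twoPtrLoop s target (low + 1) (high - 1) (count + 1)
    else if sm < target then twoPtrLoop s target (low + 1) high count
    else twoPtrLoop s target low (high - 1) count
  else count
termination_by (high - low).toNat
decreasing_by all_goals omega

def countTriple (arr : List Int) : Int :=
  let s := PySem.List.sorted arr (fun x => x) false
  let n : Int := s.length
  (PySem.List.pyRange (n - 1) 0 (-1)).foldl
    (fun count i => twoPtrLoop s (PySem.List.pyGetD s i 0) 0 (n - 1) count) 0

-- ===== PORT B =====
def countTriple_alt (arr : List Int) : Int :=
  let s := PySem.List.sorted arr (fun x => x) false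
  let n : Int := s.length
  if n < 2 then 0
  else
    let pairs : Int → Int := fun target => twoPtrLoop s target 0 (n - 1) 0
    let st := (PySem.List.slice s (some 1) none).foldl
      (fun (acc : Int × Int × Int) x =>
        if x = acc.2.1 then (acc.1, acc.2.1, acc.2.2 + 1)
        else (acc.1 + acc.2.2 * pairs acc.2.1, x, 1))
      (0, PySem.List.pyGetD s 1 0, 0)
    st.1 + st.2.2 * pairs st.2.1

-- ===== PRECONDITION & SPEC =====
def Spec_countTriple (arr : List Int) (out : Int) : Prop := out = countTriple_alt arr
instance (arr : List Int) (out : Int) : Decidable (Spec_countTriple arr out) := by unfold Spec_countTriple; infer_instance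

-- ===== CLAIM (what is proved, stated in full; the proofs are below) =====
def Claim_equal_countTriple : Prop := ∀ (arr : List Int), Dom_countTriple arr → Spec_countTriple arr (countTriple arr)

-- ===== LEMMAS AND PROOFS =====

-- the two-pointer loop only adds to its accumulator
theorem twoPtrLoop_add_aux (s : List Int) (target : Int) :
    ∀ (k : Nat) (low high count : Int), (high - low).toNat ≤ k →
      twoPtrLoop s target low high count = count + twoPtrLoop s target low high 0 := by
  intro k
  induction k with
  | zero =>
    intro low high count hk
    conv_lhs => rw [twoPtrLoop]
    conv_rhs => rw [twoPtrLoop]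
    have hnlt : ¬ low < high := by omega
    simp [hnlt]
  | succ k ih =>
    intro low high count hk
    conv_lhs => rw [twoPtrLoop]
    conv_rhs => rw [twoPtrLoop]
    by_cases hlt : low < high
    · simp only [if_pos hlt]
      rw [ih (low + 1) (high - 1) (count + 1) (by omega),
          ih (low + 1) (high - 1) (0 + 1) (by omega),
          ih (low + 1) high count (by omega),
          ih low (high - 1) count (by omega)]
      split_ifs <;> ring
    · simp [hlt]

theorem twoPtrLoop_add (s : List Int) (target low high count : Int) :
    twoPtrLoop s target low high count = count + twoPtrLoop s target low high 0 :=
  twoPtrLoop_add_aux s target (high - low).toNat low high count le_rfl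

-- folding A's inner loop over a list of indices sums its zero-accumulator results
theorem foldl_loop_sum (s : List Int) (m : Int) (g : Int → Int) (l : List Int) (init : Int) :
    l.foldl (fun c i => twoPtrLoop s (g i) 0 m c) init
      = init + (l.map (fun i => twoPtrLoop s (g i) 0 m 0)).sum := by
  induction l generalizing init with
  | nil => simp
  | cons x xs ih =>
    simp only [List.foldl_cons, List.map_cons, List.sum_cons]
    rw [twoPtrLoop_add, ih]
    ring

-- summing the scan over indices 1..len-1 is summing it over the tail's values
theorem sum_indices (s : List Int) (m : Int) :
    ((PySem.List.pyRange 1 (s.length : Int) 1).map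
        (fun i => twoPtrLoop s (PySem.List.pyGetD s i 0) 0 m 0)).sum
      = (s.tail.map (fun v => twoPtrLoop s v 0 m 0)).sum := by
  rw [show (fun i => twoPtrLoop s (PySem.List.pyGetD s i 0) 0 m 0)
      = (fun v => twoPtrLoop s v 0 m 0) ∘ (fun i => PySem.List.pyGetD s i 0) from rfl]
  rw [← List.map_map]
  rw [PySem.List.map_pyGetD_pyRange' s 0 (by omega : (0:Int) ≤ 1)]
  norm_num [List.drop_one]

-- A's outer fold is the sum of the scan result over the tail of the sorted list
theorem countTriple_eq_sum (arr : List Int) :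
    countTriple arr =
      (((PySem.List.sorted arr (fun x => x) false).tail).map
        (fun v => twoPtrLoop (PySem.List.sorted arr (fun x => x) false) v 0
          (((PySem.List.sorted arr (fun x => x) false).length : Int) - 1) 0)).sum := by
  simp only [countTriple]
  rw [foldl_loop_sum]
  rw [PySem.List.pyRange_neg_one_eq_reverse]
  rw [List.map_reverse, List.sum_reverse]
  rw [show ((0 : Int) + 1) = 1 from rfl]
  rw [show (((PySem.List.sorted arr (fun x => x) false).length : Int) - 1 + 1)
      = ((PySem.List.sorted arr (fun x => x) false).length : Int) by ring]
  rw [sum_indices]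
  ring

-- B's run-grouping fold invariant: flushing the state gives the pending sum plus the sum over the rest
theorem runFold_sum (S : List Int) (N : Int) (l : List Int) (total prev runlen : Int) :
    (l.foldl
        (fun (acc : Int × Int × Int) x =>
          if x = acc.2.1 then (acc.1, acc.2.1, acc.2.2 + 1)
          else (acc.1 + acc.2.2 * twoPtrLoop S acc.2.1 0 N 0, x, 1))
        (total, prev, runlen)).1 +
      (l.foldl
        (fun (acc : Int × Int × Int) x =>
          if x = acc.2.1 then (acc.1, acc.2.1, acc.2.2 + 1)
          else (acc.1 + acc.2.2 * twoPtrLoop S acc.2.1 0 N 0, x, 1))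
        (total, prev, runlen)).2.2 *
      twoPtrLoop S (l.foldl
        (fun (acc : Int × Int × Int) x =>
          if x = acc.2.1 then (acc.1, acc.2.1, acc.2.2 + 1)
          else (acc.1 + acc.2.2 * twoPtrLoop S acc.2.1 0 N 0, x, 1))
        (total, prev, runlen)).2.1 0 N 0
      = total + runlen * twoPtrLoop S prev 0 N 0
        + (l.map (fun v => twoPtrLoop S v 0 N 0)).sum := by
  induction l generalizing total prev runlen with
  | nil => simp
  | cons x xs ih =>
    simp only [List.foldl_cons, List.map_cons, List.sum_cons]
    by_cases h : x = prev
    · subst h; rw [if_pos rfl, ih]; ring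
    · rw [if_neg h, ih]; ring

-- ===== VERDICT (by name: the statement is the Claim_ definition above) =====
theorem countTriple_spec : Claim_equal_countTriple := by
  intro arr _
  unfold Spec_countTriple
  rw [countTriple_eq_sum]
  simp only [countTriple_alt]
  by_cases h2 : ((PySem.List.sorted arr (fun x => x) false).length : Int) < 2
  · rw [if_pos h2]
    have ht : (PySem.List.sorted arr (fun x => x) false).tail = [] := by
      apply List.eq_nil_of_length_eq_zero
      rw [List.length_tail]
      omega
    simp [ht]
  · rw [if_neg h2]
    rw [PySem.List.slice_from_one]
    rw [runFold_sum]
    ring
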